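-- pv_equiv track=rewrite | github.com/antoniojsp/challenges | Leetcode/python/sol3745.py | maximizeExpressionOfThree
-- ===== SOURCE A (Python) =====
-- from typing import List
--
-- def maximizeExpressionOfThree(nums: List[int]) -> int:
--     max1 = max2 = float("-inf")
--     min1 = float("inf")
--     for i in nums:
--         if max1 < i:
--             max2 = max1
--             max1 = i
--         elif i > max2:
--             max2 = i
--         if i < min1:
--             min1 = i
--     return max1 + max2 - min1
-- ===== SOURCE B (Python) =====
-- def maximizeExpressionOfThree(nums):
--     s = sorted(nums)
--     return s[-1] + s[-2] - s[0]
-- ===== Notes on version B (the rewrite author's own statement) =====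
-- stated objective: simpler
-- what changed: Replaces the incremental top-two/min tracking loop with sorting the list once and reading the last two and first elements.
-- outside the precondition, e.g. on maximizeExpressionOfThree([]): A returns -inf, B raises IndexError; on maximizeExpressionOfThree([5]): A returns -inf, B raises IndexError
import Mathlib
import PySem

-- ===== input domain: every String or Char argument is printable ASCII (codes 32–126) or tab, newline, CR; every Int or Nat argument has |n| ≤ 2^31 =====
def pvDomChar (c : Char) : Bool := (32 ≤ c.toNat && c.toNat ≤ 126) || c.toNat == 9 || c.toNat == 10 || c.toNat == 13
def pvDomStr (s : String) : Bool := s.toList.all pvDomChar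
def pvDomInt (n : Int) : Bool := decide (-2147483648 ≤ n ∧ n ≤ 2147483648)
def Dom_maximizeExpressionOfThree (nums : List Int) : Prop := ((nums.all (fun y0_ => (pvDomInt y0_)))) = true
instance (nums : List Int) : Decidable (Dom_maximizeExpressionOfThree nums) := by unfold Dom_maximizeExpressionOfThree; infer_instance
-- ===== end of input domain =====

-- B replaces A's incremental top-two/min tracking loop by sorting once and reading
-- the last two and the first element (objective: simpler). Pre_ excludes lists of
-- length < 2, on which A returns float('-inf') (not an int) and B raises IndexError.


-- ===== PORT A =====
-- A's loop body, one iteration on state (max1, max2, min1); none encodes float('-inf')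
-- for max1/max2 and float('inf') for min1, so the Bool tests below are exactly A's
-- comparisons 'max1 < i', 'i > max2', 'i < min1'.
def pvStep (s : Option Int × Option Int × Option Int) (i : Int) : Option Int × Option Int × Option Int :=
  match s with
  | (max1, max2, min1) =>
    let b1 : Bool := match max1 with | none => true | some a => decide (a < i)
    let b2 : Bool := match max2 with | none => true | some b => decide (b < i)
    let b3 : Bool := match min1 with | none => true | some m => decide (i < m)
    ((if b1 then some i else max1),
     (if b1 then max1 else if b2 then some i else max2),
     (if b3 then some i else min1))

def maximizeExpressionOfThree (nums : List Int) : Int :=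
  match nums.foldl pvStep (none, none, none) with
  | (some a, some b, some m) => a + b - m
  | _ => 0  -- unreachable under Pre_ (len ≥ 2): Python returns a float sentinel here

-- ===== PORT B =====
def maximizeExpressionOfThree_alt (nums : List Int) : Int :=
  let s := PySem.List.sorted nums (fun x => x) false
  -- the .getD 0 defaults are unreachable under Pre_ (len ≥ 2): Python B raises IndexError there
  (PySem.List.pyGet? s (-1)).getD 0 + (PySem.List.pyGet? s (-2)).getD 0 - (PySem.List.pyGet? s 0).getD 0

-- ===== PRECONDITION & SPEC =====
-- Pre_ excludes lists of length < 2: there A returns float('-inf'), which is not a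
-- value of the declared int type, and B raises IndexError.
def Pre_maximizeExpressionOfThree (nums : List Int) : Prop := 2 ≤ nums.length
instance (nums : List Int) : Decidable (Pre_maximizeExpressionOfThree nums) := by
  unfold Pre_maximizeExpressionOfThree; infer_instance
def pvWitness_maximizeExpressionOfThree : List Int := [3, -1, 4, 1]
def Spec_maximizeExpressionOfThree (nums : List Int) (out : Int) : Prop := out = maximizeExpressionOfThree_alt nums
instance (nums : List Int) (out : Int) : Decidable (Spec_maximizeExpressionOfThree nums out) := by unfold Spec_maximizeExpressionOfThree; infer_instance

-- ===== CLAIM (what is proved, stated in full; the proofs are below) =====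
def Claim_equal_maximizeExpressionOfThree : Prop := ∀ (nums : List Int), Dom_maximizeExpressionOfThree nums → Pre_maximizeExpressionOfThree nums → Spec_maximizeExpressionOfThree nums (maximizeExpressionOfThree nums)

-- ===== LEMMAS AND PROOFS =====

-- pvStep is right-commutative, so A's fold may be evaluated on the sorted permutation.
set_option maxHeartbeats 2000000 in
theorem pvStep_comm (s : Option Int × Option Int × Option Int) (i j : Int) :
    pvStep (pvStep s i) j = pvStep (pvStep s j) i := by
  obtain ⟨m1, m2, mn⟩ := s
  rcases m1 with _ | a <;> rcases m2 with _ | b <;> rcases mn with _ | m <;>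
    simp only [pvStep] <;> split_ifs <;> simp_all <;> omega

-- One step on an element ≥ the current max: the top pair shifts, the min is unchanged.
theorem pvStep_ge (a b m x : Int) (hb : b ≤ a) (hm : m ≤ a) (hx : a ≤ x) :
    pvStep (some a, some b, some m) x = (some x, some a, some m) := by
  simp only [pvStep] ; split_ifs <;> simp_all <;> omega

-- Folding pvStep over an ascending chain of elements ≥ the current max yields the
-- last two elements (read off the reversed list) and leaves the min unchanged.
theorem fold_chain (s : List Int) : ∀ (a b m : Int), b ≤ a → m ≤ a →
    (∀ x ∈ s, a ≤ x) → s.Pairwise (· ≤ ·) →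
    s.foldl pvStep (some a, some b, some m) =
      (match s.reverse with
       | [] => (some a, some b, some m)
       | [p] => (some p, some a, some m)
       | p :: q :: _ => (some p, some q, some m)) := by
  induction s with
  | nil => intro a b m _ _ _ _; rfl
  | cons x t ih =>
    intro a b m hb hm hall hpw
    have hax : a ≤ x := hall x (by simp)
    have hxt : ∀ z ∈ t, x ≤ z := fun z hz => (List.pairwise_cons.mp hpw).1 z hz
    have hstep : pvStep (some a, some b, some m) x = (some x, some a, some m) :=
      pvStep_ge a b m x hb hm hax
    have hrec := ih x a m hax (le_trans hm hax) hxt (List.pairwise_cons.mp hpw).2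
    rw [List.foldl_cons, hstep, hrec]
    rcases ht : t.reverse with _ | ⟨p, _ | ⟨q, rr⟩⟩ <;> simp [List.reverse_cons, ht]

theorem sorted_result (nums : List Int) (h : 2 ≤ nums.length) :
    maximizeExpressionOfThree nums = maximizeExpressionOfThree_alt nums := by
  have hperm : (PySem.List.sorted nums (fun x => x) false).Perm nums :=
    PySem.List.sorted_perm nums (fun x => x) false
  have hfold : nums.foldl pvStep (none, none, none) =
      (PySem.List.sorted nums (fun x => x) false).foldl pvStep (none, none, none) :=
    (hperm.foldl_eq' (fun x _ y _ z => pvStep_comm z x y) (none, none, none)).symm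
  have hlen : 2 ≤ (PySem.List.sorted nums (fun x => x) false).length := by
    rw [hperm.length_eq]; exact h
  have hpw0 : (PySem.List.sorted nums (fun x => x) false).Pairwise (fun a b => a ≤ b) := by
    simpa using PySem.List.sorted_pairwise (α := Int) nums (fun x => x)
  obtain ⟨x, y, t, hst⟩ : ∃ x y t,
      PySem.List.sorted nums (fun x => x) false = x :: y :: t := by
    rcases hc : PySem.List.sorted nums (fun x => x) false with _ | ⟨x, _ | ⟨y, t⟩⟩
    · rw [hc] at hlen; simp at hlen
    · rw [hc] at hlen; simp at hlen
    · exact ⟨x, y, t, rfl⟩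
  rw [hst] at hpw0 hfold
  have hxy : x ≤ y := (List.pairwise_cons.mp hpw0).1 y (by simp)
  have hyt : ∀ z ∈ t, y ≤ z := fun z hz =>
    (List.pairwise_cons.mp (List.pairwise_cons.mp hpw0).2).1 z hz
  have hpwt : t.Pairwise (fun a b => a ≤ b) :=
    (List.pairwise_cons.mp (List.pairwise_cons.mp hpw0).2).2
  -- first two iterations of A's loop
  have h1 : pvStep (none, none, none) x = (some x, none, some x) := by
    simp [pvStep]
  have h2 : pvStep (some x, none, some x) y = (some y, some x, some x) := by
    simp only [pvStep]; split_ifs <;> simp_all <;> omega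
  have hchain := fold_chain t y x x hxy hxy hyt hpwt
  unfold maximizeExpressionOfThree maximizeExpressionOfThree_alt
  rw [hfold, hst, List.foldl_cons, List.foldl_cons, h1, h2, hchain]
  rcases ht : t.reverse with _ | ⟨p, _ | ⟨q, rr⟩⟩
  · have : t = [] := by simpa using congrArg List.reverse ht
    subst this
    simp [PySem.List.pyGet?, PySem.List.pyIdx?]
  · have : t = [p] := by simpa using congrArg List.reverse ht
    subst this
    simp [PySem.List.pyGet?, PySem.List.pyIdx?]
  · have htt : t = rr.reverse ++ [q, p] := by simpa using congrArg List.reverse ht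
    subst htt
    have hg1 : PySem.List.pyGet? (x :: y :: (rr.reverse ++ [q, p])) (-1) = some p := by
      have hform1 : x :: y :: (rr.reverse ++ [q, p]) = (x :: y :: rr.reverse ++ [q]) ++ [p] := by
        simp
      rw [hform1]
      exact PySem.List.pyGet?_neg_one_append_singleton _ _
    have hform2 : x :: y :: (rr.reverse ++ [q, p]) = (x :: y :: rr.reverse) ++ [q, p] := by
      simp
    have hg2 : PySem.List.pyGet? (x :: y :: (rr.reverse ++ [q, p])) (-2) = some q := by
      rw [PySem.List.pyGet?_neg_ofNat _ 2 (by omega) (by simp)]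
      rw [hform2]
      have hidx : ((x :: y :: rr.reverse) ++ [q, p]).length - 2 = (x :: y :: rr.reverse).length := by
        simp
      rw [hidx, List.getElem?_append_right (le_refl _)]
      simp
    have hg3 : PySem.List.pyGet? (x :: y :: (rr.reverse ++ [q, p])) 0 = some x :=
      PySem.List.pyGet?_zero_cons x _
    simp only [hg1, hg2, hg3, Option.getD_some]

-- ===== VERDICT (by name: the statement is the Claim_ definition above) =====
theorem maximizeExpressionOfThree_spec : Claim_equal_maximizeExpressionOfThree := by
  intro nums _ hpre
  exact sorted_result nums hpre
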